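-- pv_equiv track=rewrite | github.com/ninyjuu/uerj | 2o periodo/aed1/p1/busca e sort/inteiros grandes.py | convIntNG
-- ===== SOURCE A (Python) =====
-- def convIntNG(k):
--     B = [0] * 10  # Supondo tamanho fixo de 10 para o vetor B
--     if k > 0:
--         B[0] = 1
--     else:
--         B[0] = -1
--         k = -k
--
--     for i in range(len(B) - 1, 0, -1):
--         B[i] = k % 10
--         k = k // 10
--
--     return B
-- ===== SOURCE B (Python) =====
-- def convIntNG(k):
--     sign = 1 if k > 0 else -1
--     s = str(abs(k))[-9:].zfill(9)
--     return [sign] + [int(c) for c in s]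
-- ===== Notes on version B (the rewrite author's own statement) =====
-- stated objective: idiomatic
-- what changed: B builds the nine digit slots from the decimal string of abs(k) (last 9 chars, zero-filled, one int(c) per char) instead of A's in-place array mutation with a reverse-index loop of %/// arithmetic.
import Mathlib
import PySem

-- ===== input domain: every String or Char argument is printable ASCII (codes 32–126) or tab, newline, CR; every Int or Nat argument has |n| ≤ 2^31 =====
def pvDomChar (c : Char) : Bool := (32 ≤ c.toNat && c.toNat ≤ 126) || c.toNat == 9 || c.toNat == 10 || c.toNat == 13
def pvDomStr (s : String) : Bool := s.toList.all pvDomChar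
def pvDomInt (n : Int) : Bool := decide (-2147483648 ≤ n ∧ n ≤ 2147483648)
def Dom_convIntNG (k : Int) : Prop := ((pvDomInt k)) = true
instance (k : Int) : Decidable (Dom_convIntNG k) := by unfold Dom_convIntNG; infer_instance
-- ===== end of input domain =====

-- B replaces A's in-place array mutation and reverse-index %/// loop by formatting abs(k)
-- as a decimal string, taking the last 9 characters zero-filled, and reading one digit per
-- character (objective: idiomatic). Equivalence proved on Dom (|k| ≤ 2^31).


-- ===== PORT A =====
def convIntNG (k : Int) : List Int :=
  let B0 : List Int := List.replicate 10 0
  let st0 : List Int × Int :=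
    if k > 0 then (PySem.List.pySetD B0 0 1, k) else (PySem.List.pySetD B0 0 (-1), -k)
  let st := (PySem.List.pyRange (10 - 1) 0 (-1)).foldl
    (fun (s : List Int × Int) i =>
      (PySem.List.pySetD s.1 i (PySem.Int.mod s.2 10), PySem.Int.floordiv s.2 10)) st0
  st.1

-- ===== PORT B =====
def convIntNG_alt (k : Int) : List Int :=
  let sign : Int := if k > 0 then 1 else -1
  let s : List Char := PySem.Int.toChars (if k < 0 then -k else k)   -- str(abs(k))
  let t : List Char := PySem.Chars.zfill (PySem.List.slice s (some (-9)) none) 9  -- s[-9:].zfill(9)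
  -- int(c): exact on the digit characters '0'..'9', which are all str(abs(k)) produces
  sign :: t.map (fun c => ((c.toNat : Int) - 48))

-- ===== PRECONDITION & SPEC =====
def Spec_convIntNG (k : Int) (out : List Int) : Prop := out = convIntNG_alt k
instance (k : Int) (out : List Int) : Decidable (Spec_convIntNG k out) := by unfold Spec_convIntNG; infer_instance

-- ===== CLAIM (what is proved, stated in full; the proofs are below) =====
def Claim_equal_convIntNG : Prop := ∀ (k : Int), Dom_convIntNG k → Spec_convIntNG k (convIntNG k)

-- ===== LEMMAS AND PROOFS =====

-- A's tail of nine digit slots, big-endian, as Int arithmetic.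
def tailA (m : Int) : List Int :=
  [m / 10^8 % 10, m / 10^7 % 10, m / 10^6 % 10, m / 10^5 % 10,
   m / 10^4 % 10, m / 10^3 % 10, m / 10^2 % 10, m / 10^1 % 10, m % 10]

lemma convIntNG_pos (k : Int) (h : k > 0) : convIntNG k = 1 :: tailA k := by
  simp only [convIntNG, h, if_pos]
  rw [show PySem.List.pyRange (10-1) 0 (-1) = [9,8,7,6,5,4,3,2,1] from by decide]
  simp [List.foldl, PySem.List.pySetD_of_nonneg, tailA]
  norm_num [Int.ediv_ediv_of_nonneg]

lemma convIntNG_nonpos (k : Int) (h : ¬ k > 0) : convIntNG k = -1 :: tailA (-k) := by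
  simp only [convIntNG, h, if_false]
  rw [show PySem.List.pyRange (10-1) 0 (-1) = [9,8,7,6,5,4,3,2,1] from by decide]
  simp [List.foldl, PySem.List.pySetD_of_nonneg, tailA]
  norm_num [Int.ediv_ediv_of_nonneg]

lemma toDigitsCore_eq (f : Nat) : ∀ (n : Nat) (acc : List Char), 0 < n → n ≤ f →
    Nat.toDigitsCore 10 f n acc = ((Nat.digits 10 n).map Nat.digitChar).reverse ++ acc := by
  induction f with
  | zero => intro n acc h0 hf; omega
  | succ f ih =>
    intro n acc h0 hf
    rw [Nat.toDigitsCore]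
    by_cases hq : n / 10 = 0
    · rw [if_pos hq, Nat.digits_def' (by norm_num : 1 < 10) h0, hq]
      simp
    · rw [if_neg hq, ih (n / 10) _ (Nat.pos_of_ne_zero hq)
        (by have := Nat.div_lt_self h0 (by norm_num : 1 < 10); omega)]
      rw [Nat.digits_def' (by norm_num : 1 < 10) h0]
      simp

lemma toDigits_eq (n : Nat) (h : 0 < n) :
    Nat.toDigits 10 n = ((Nat.digits 10 n).map Nat.digitChar).reverse := by
  rw [Nat.toDigits, toDigitsCore_eq (n+1) n [] h (by omega), List.append_nil]

lemma digitChar_ne (d : Nat) (h : d < 10) :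
    Nat.digitChar d ≠ '+' ∧ Nat.digitChar d ≠ '-' := by
  interval_cases d <;> exact ⟨by decide, by decide⟩

lemma val_digitChar (d : Nat) (h : d < 10) : ((Nat.digitChar d).toNat : Int) - 48 = d := by
  interval_cases d <;> decide

-- getD of the zero-padded reversed-truncated digit list is the (8-i)-th little-endian digit.
lemma padded_getD (es : List Int) (i : Nat) (hi : i < 9) (h1 : 1 ≤ es.length)
    (h10 : es.length ≤ 10) :
    (List.replicate (9 - min es.length 9) 0 ++ es.reverse.drop (es.length - 9)).getD i 0
      = es.getD (8 - i) 0 := by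
  have hlen2 : (es.reverse.drop (es.length - 9)).length = min es.length 9 := by
    simp; omega
  by_cases hp : i < 9 - min es.length 9
  · rw [List.getD_append _ _ 0 i (by simp; omega)]
    rw [show (List.replicate (9 - min es.length 9) (0:Int)).getD i 0 = 0 by
      simp [List.getD_eq_getElem?_getD]]
    exact (List.getD_eq_default _ _ (by omega)).symm
  · rw [List.getD_append_right _ _ 0 i (by simp; omega)]
    simp only [List.length_replicate]
    rw [List.getD_eq_getElem _ 0 (by omega)]
    rw [List.getElem_drop]
    rw [List.getElem_reverse]
    rw [List.getD_eq_getElem _ 0 (show 8 - i < es.length by omega)]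
    congr 1
    omega

-- Core of the equivalence: for 0 < n < 10^10 the nine arithmetic digit slots equal the
-- string-built slots.
lemma tail_eq (n : Nat) (h0 : 0 < n) (hn : n < 10^10) :
    tailA (n : Int)
      = (PySem.Chars.zfill
          (PySem.List.slice (((Nat.digits 10 n).map Nat.digitChar).reverse) (some (-9)) none) 9).map
          (fun c => ((c.toNat : Int) - 48)) := by
  set ds := Nat.digits 10 n with hds
  have hlt : ∀ d ∈ ds, d < 10 := fun d hd => Nat.digits_lt_base (by norm_num) hd
  have hlen1 : 1 ≤ ds.length := by
    have hne : ds ≠ [] := by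
      rw [hds]; exact Nat.digits_ne_nil_iff_ne_zero.mpr (by omega)
    exact List.length_pos_of_ne_nil hne
  have hlen10 : ds.length ≤ 10 := by
    rw [hds]; exact (Nat.digits_length_le_iff (by norm_num) n).mpr hn
  set rv : List Char := (ds.map Nat.digitChar).reverse with hrv
  have hrvlen : rv.length = ds.length := by simp [hrv]
  rw [PySem.List.slice_from_neg_ofNat rv 9 (by norm_num)]
  set rd : List Char := rv.drop (rv.length - 9) with hrd
  have hrdlen : rd.length = min ds.length 9 := by simp [hrd, hrvlen]; omega
  have hmem : ∀ c ∈ rd, ∃ d, d < 10 ∧ c = Nat.digitChar d := by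
    intro c hc
    have : c ∈ ds.map Nat.digitChar := by
      have := List.mem_of_mem_drop hc
      rw [hrv] at this; exact List.mem_reverse.mp this
    obtain ⟨d, hd, rfl⟩ := List.mem_map.mp this
    exact ⟨d, hlt d hd, rfl⟩
  have hz : PySem.Chars.zfill rd 9 = List.replicate (9 - rd.length) '0' ++ rd := by
    by_cases hc : (9 : Int) ≤ rd.length
    · rw [PySem.Chars.zfill.eq_def, if_pos hc]
      have : 9 - rd.length = 0 := by omega
      rw [this]; simp
    · obtain ⟨c, rest, hcr⟩ : ∃ c rest, rd = c :: rest := by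
        cases hx : rd with
        | nil => exfalso; rw [hx] at hrdlen; simp at hrdlen; omega
        | cons c rest => exact ⟨c, rest, rfl⟩
      obtain ⟨d, hd10, hcd⟩ := hmem c (by rw [hcr]; simp)
      have hne := digitChar_ne d hd10
      rw [PySem.Chars.zfill.eq_def, if_neg hc, hcr]
      simp [hcd, hne.1, hne.2]
  rw [hz]
  -- push the map through pad and digits
  rw [List.map_append, List.map_replicate]
  have hpad : (('0'.toNat : Int) - 48) = 0 := by decide
  rw [hpad]
  have hcomp : ds.map (fun d => ((Nat.digitChar d).toNat : Int) - 48)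
      = ds.map (fun d : Nat => (d : Int)) :=
    List.map_congr_left (fun d hd => val_digitChar d (hlt d hd))
  have hmap : rd.map (fun c => ((c.toNat : Int) - 48))
      = (ds.map (fun d : Nat => (d : Int))).reverse.drop (ds.length - 9) := by
    rw [hrd, List.map_drop, hrv, List.map_reverse, List.map_map, hrvlen]
    rw [show ((fun c : Char => ((c.toNat : Int) - 48)) ∘ Nat.digitChar)
        = fun d => ((Nat.digitChar d).toNat : Int) - 48 from rfl, hcomp]
  rw [hmap, hrdlen]
  -- elementwise comparison
  set es : List Int := ds.map (fun d : Nat => (d : Int)) with hes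
  have heslen : es.length = ds.length := by simp [hes]
  have hgetD : ∀ j : Nat, es.getD j 0 = ((n : Int) / 10 ^ j % 10) := by
    intro j
    have h1 : ds.getD j 0 = n / 10 ^ j % 10 := Nat.getD_digits n j (by norm_num)
    have h2 : es.getD j 0 = ((ds.getD j 0 : Nat) : Int) := by
      by_cases hj : j < ds.length
      · rw [hes, List.getD_eq_getElem _ 0 (by simpa using hj),
          List.getD_eq_getElem _ 0 hj, List.getElem_map]
      · rw [List.getD_eq_default _ _ (by simp [hes]; omega),
          List.getD_eq_default _ _ (by omega)]
        rfl
    rw [h2, h1]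
    push_cast
    rfl
  apply List.ext_getElem
  · simp [tailA, heslen]; omega
  · intro i hi1 hi2
    have hi9 : i < 9 := by simpa [tailA] using hi1
    have := padded_getD es i hi9 (by omega) (by omega)
    rw [heslen] at this
    rw [← List.getD_eq_getElem _ 0 hi2, this, hgetD]
    interval_cases i <;> simp [tailA]

-- ===== VERDICT (by name: the statement is the Claim_ definition above) =====
theorem convIntNG_spec : Claim_equal_convIntNG := by
  intro k hdom
  unfold Spec_convIntNG
  have hb : -2147483648 ≤ k ∧ k ≤ 2147483648 := by
    unfold Dom_convIntNG pvDomInt at hdom; exact of_decide_eq_true hdom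
  by_cases hk0 : k = 0
  · subst hk0; decide
  by_cases hk : k > 0
  · rw [convIntNG_pos k hk]
    have hk' : ¬ k < 0 := by omega
    have hn : k = ((k.toNat : Nat) : Int) := by omega
    simp only [convIntNG_alt, hk, if_pos, hk', if_false, PySem.Int.toChars]
    rw [toDigits_eq k.toNat (by omega)]
    conv_lhs => rw [show k = ((k.toNat : Nat) : Int) from by omega]
    exact congrArg _ (tail_eq k.toNat (by omega) (by omega))
  · rw [convIntNG_nonpos k hk]
    have hk' : k < 0 := by omega
    have hn : -k = (((-k).toNat : Nat) : Int) := by omega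
    have hknn : ¬ (-k < 0) := by omega
    simp only [convIntNG_alt, hk, if_false, hk', if_pos, hknn, PySem.Int.toChars]
    rw [toDigits_eq (-k).toNat (by omega)]
    conv_lhs => rw [show -k = (((-k).toNat : Nat) : Int) from by omega]
    exact congrArg _ (tail_eq (-k).toNat (by omega) (by omega))
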